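-- pv_equiv track=rewrite | github.com/upadhayayarajesh/DataStructureAndAlgorithm | array/max_sum_circular_subarray.py | max_sum_circular_subarray_2
-- ===== SOURCE A (Python) =====
-- def max_sum_circular_subarray_2(arr):
--     """
--     Find the maximum of circular subarray sum in an array efficient solution
--     Time Complexity: O(N)
--     Space Complexity: O(1)
--     :param arr:Array
--     :return: Integer
--     """
--     max_sum = arr[0]
--     min_sum = arr[0]
--     max_end = arr[0]
--     min_end = arr[0]
--     total_sum = arr[0]
--     for i in range(1, len(arr)):
--         max_end = max(max_end + arr[i], arr[i])
--         max_sum = max(max_sum, max_end)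
--         min_end = min(min_end + arr[i], arr[i])
--         min_sum = min(min_end, min_sum)
--         total_sum += arr[i]
--     if max_sum < 0:
--         return max_sum
--     max_sum = max(max_sum, (total_sum - min_sum))
--     return max_sum
-- ===== SOURCE B (Python) =====
-- def max_sum_circular_subarray_2(arr):
--     # Prefix-sum algorithm: materialize the prefix-sum array pre (pre[j] = arr[0]+...+arr[j-1]),
--     # then best subarray = max over j of pre[j] minus the minimum earlier prefix,
--     # worst subarray = min over j of pre[j] minus the maximum earlier prefix.
--     pre = [0]
--     p = 0
--     for x in arr:
--         p += x
--         pre.append(p)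
--     best = worst = pre[1]
--     lo, hi = min(0, pre[1]), max(0, pre[1])
--     for q in pre[2:]:
--         best = max(best, q - lo)
--         worst = min(worst, q - hi)
--         lo = min(lo, q)
--         hi = max(hi, q)
--     if best < 0:
--         return best
--     return max(best, p - worst)
-- ===== Notes on version B (the rewrite author's own statement) =====
-- stated objective: alternative
-- what changed: Replaces Kadane's DP recurrence (max_end/min_end updated per element) by the prefix-sum algorithm: it materializes the prefix-sum array, then obtains the best subarray as max of pre[j] minus the running minimum of earlier prefixes and the worst subarray symmetrically, combining them with the total as A does.
import Mathlib
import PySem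

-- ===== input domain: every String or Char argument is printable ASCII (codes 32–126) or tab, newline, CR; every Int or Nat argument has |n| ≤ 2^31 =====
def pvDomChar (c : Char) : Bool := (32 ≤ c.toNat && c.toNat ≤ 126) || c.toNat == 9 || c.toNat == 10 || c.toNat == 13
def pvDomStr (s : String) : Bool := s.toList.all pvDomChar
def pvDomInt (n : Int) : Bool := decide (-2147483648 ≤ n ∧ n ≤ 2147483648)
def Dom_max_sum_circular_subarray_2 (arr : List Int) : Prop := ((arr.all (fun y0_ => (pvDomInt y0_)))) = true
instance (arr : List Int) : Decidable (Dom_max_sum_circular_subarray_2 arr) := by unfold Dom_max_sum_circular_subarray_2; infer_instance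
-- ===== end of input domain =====

-- B replaces Kadane's recurrence by the prefix-sum algorithm (materialized prefix-sum array, then running extrema of earlier prefixes): an alternative O(n) algorithm, not claimed faster.

-- ===== PORT A =====
-- A's loop body: state (max_sum, min_sum, max_end, min_end, total_sum), one step per element
def pvStepA : (Int × Int × Int × Int × Int) → Int → (Int × Int × Int × Int × Int) :=
  fun st x =>
    let maxE := max (st.2.2.1 + x) x
    let maxS := max st.1 maxE
    let minE := min (st.2.2.2.1 + x) x
    let minS := min minE st.2.1
    (maxS, minS, maxE, minE, st.2.2.2.2 + x)

-- one fused loop over arr[1:] (range(1,len(arr)) indexing arr[i] traverses exactly arr[1:])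
def max_sum_circular_subarray_2 (arr : List Int) : Int :=
  match arr with
  | [] => 0  -- unreachable under Pre_: Python raises IndexError on arr[0]
  | a0 :: rest =>
    let st := rest.foldl pvStepA (a0, a0, a0, a0, a0)
    if st.1 < 0 then st.1 else max st.1 (st.2.2.2.2 - st.2.1)

-- ===== PORT B =====
-- Source B's first loop: append the running total p to pre, state (pre, p)
def pvStepPre : (List Int × Int) → Int → (List Int × Int) :=
  fun s x => (s.1 ++ [s.2 + x], s.2 + x)

-- Source B's second loop over pre[2:], state (best, worst, lo, hi)
def pvStepB : (Int × Int × Int × Int) → Int → (Int × Int × Int × Int) :=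
  fun s q => (max s.1 (q - s.2.2.1), min s.2.1 (q - s.2.2.2), min s.2.2.1 q, max s.2.2.2 q)

-- pre always starts with 0, so the match reads pre[1] as p1 and pre[2:] as tail;
-- the other branch is unreachable under Pre_ (arr = [], where Python raises IndexError on pre[1])
def max_sum_circular_subarray_2_alt (arr : List Int) : Int :=
  let build := arr.foldl pvStepPre ([0], 0)
  let p := build.2
  match build.1 with
  | _ :: p1 :: tail =>
    let st := tail.foldl pvStepB (p1, p1, min 0 p1, max 0 p1)
    if st.1 < 0 then st.1 else max st.1 (p - st.2.1)
  | _ => 0  -- unreachable under Pre_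

-- ===== PRECONDITION & SPEC =====
-- Pre_ excludes only the empty list, on which A raises IndexError (arr[0]); B raises there too (pre[1]).
def Pre_max_sum_circular_subarray_2 (arr : List Int) : Prop := arr ≠ []
instance (arr : List Int) : Decidable (Pre_max_sum_circular_subarray_2 arr) := by unfold Pre_max_sum_circular_subarray_2; infer_instance
def pvWitness_max_sum_circular_subarray_2 : List Int := [1, -2, 3]

def Spec_max_sum_circular_subarray_2 (arr : List Int) (out : Int) : Prop := out = max_sum_circular_subarray_2_alt arr
instance (arr : List Int) (out : Int) : Decidable (Spec_max_sum_circular_subarray_2 arr out) := by unfold Spec_max_sum_circular_subarray_2; infer_instance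

-- ===== CLAIM (what is proved, stated in full; the proofs are below) =====
def Claim_equal_max_sum_circular_subarray_2 : Prop := ∀ (arr : List Int), Dom_max_sum_circular_subarray_2 arr → Pre_max_sum_circular_subarray_2 arr → Spec_max_sum_circular_subarray_2 arr (max_sum_circular_subarray_2 arr)

-- ===== LEMMAS AND PROOFS =====

-- prefix sums of l starting from running total c (proof-only helper)
def pvPresFrom (c : Int) : List Int → List Int
  | [] => []
  | x :: xs => (c + x) :: pvPresFrom (c + x) xs

-- B's first loop produces the prefix-sum list and the total
theorem pv_build (l : List Int) (acc : List Int) (c : Int) :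
    l.foldl pvStepPre (acc, c) = (acc ++ pvPresFrom c l, c + l.sum) := by
  induction l generalizing acc c with
  | nil => simp [pvPresFrom]
  | cons x xs ih => simp [pvStepPre, pvPresFrom, ih, List.append_assoc]; ring

-- A's total_sum component is the running sum
theorem pv_total (l : List Int) (ms mns me mne t : Int) :
    (l.foldl pvStepA (ms, mns, me, mne, t)).2.2.2.2 = t + l.sum := by
  induction l generalizing ms mns me mne t with
  | nil => simp
  | cons x xs ih => simp only [List.foldl_cons, List.sum_cons, pvStepA, ih]; ring

-- A's fused Kadane fold, started from a state whose max_end/min_end are c - lo / c - hi,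
-- projects (via (ms,mns,me,mne,t) ↦ (ms, mns, min (t-me) t, max (t-mne) t)) onto B's
-- prefix-scan fold over the prefix sums of the remaining elements.
theorem pv_scan (l : List Int) (c ms mns lo hi : Int) :
    (pvPresFrom c l).foldl pvStepB (ms, mns, min lo c, max hi c)
    = (let a := l.foldl pvStepA (ms, mns, c - lo, c - hi, c)
       (a.1, a.2.1, min (a.2.2.2.2 - a.2.2.1) a.2.2.2.2, max (a.2.2.2.2 - a.2.2.2.1) a.2.2.2.2)) := by
  induction l generalizing c ms mns lo hi with
  | nil => simp [pvPresFrom, sub_sub_cancel]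
  | cons x xs ih =>
    simp only [pvPresFrom, List.foldl_cons]
    have key := ih (c + x) (max ms (max (c - lo + x) x)) (min (min (c - hi + x) x) mns)
      (min lo c) (max hi c)
    have eL : pvStepB (ms, mns, min lo c, max hi c) (c + x)
        = (max ms (max (c - lo + x) x), min (min (c - hi + x) x) mns,
           min (min lo c) (c + x), max (max hi c) (c + x)) := by
      simp only [pvStepB, Prod.mk.injEq]
      exact ⟨by omega, by omega, trivial⟩
    have eR : pvStepA (ms, mns, c - lo, c - hi, c) x
        = (max ms (max (c - lo + x) x), min (min (c - hi + x) x) mns,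
           (c + x) - min lo c, (c + x) - max hi c, c + x) := by
      simp only [pvStepA, Prod.mk.injEq]
      exact ⟨trivial, trivial, by omega, by omega, trivial⟩
    rw [eL, eR]
    exact key

-- ===== VERDICT (by name: the statement is the Claim_ definition above) =====
theorem max_sum_circular_subarray_2_spec : Claim_equal_max_sum_circular_subarray_2 := by
  intro arr _ hpre
  unfold Spec_max_sum_circular_subarray_2
  match arr with
  | [] => exact absurd rfl hpre
  | a0 :: rest =>
    show max_sum_circular_subarray_2 (a0 :: rest) = max_sum_circular_subarray_2_alt (a0 :: rest)
    unfold max_sum_circular_subarray_2 max_sum_circular_subarray_2_alt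
    rw [pv_build]
    simp only [pvPresFrom, List.sum_cons, zero_add, List.singleton_append]
    have hs := pv_scan rest a0 a0 a0 0 0
    simp only [sub_zero] at hs
    rw [hs, pv_total]
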